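-- pv_equiv track=rewrite | github.com/pypi-data/pypi-mirror-61 | packages/Finder138/Finder138-1.2.5-py3-none-any.whl/Finder138/__init__.py | get_list_indexes
-- ===== SOURCE A (Python) =====
-- def get_list_indexes(text, aims):
--     """
--     从列表中找出目标文本的所有索引值。
--     """
--     if type(text) != list: raise TypeError("This must be list type. ")
--     info  = []
--     a = 0
--     for i in text:
--         if i == aims: info.append(a)
--         a += 1
--     return info
-- ===== SOURCE B (Python) =====
-- def get_list_indexes(text, aims):
--     if type(text) != list: raise TypeError("This must be list type. ")
--     info = []
--     start = 0
--     while True: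
--         try:
--             idx = text.index(aims, start)
--         except ValueError:
--             break
--         info.append(idx)
--         start = idx + 1
--     return info
-- ===== Notes on version B (the rewrite author's own statement) =====
-- stated objective: alternative
-- what changed: Replaces the explicit element-by-element enumeration with a counter by a cursor loop that repeatedly calls list.index(aims, start) to jump from match to match.
import Mathlib
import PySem

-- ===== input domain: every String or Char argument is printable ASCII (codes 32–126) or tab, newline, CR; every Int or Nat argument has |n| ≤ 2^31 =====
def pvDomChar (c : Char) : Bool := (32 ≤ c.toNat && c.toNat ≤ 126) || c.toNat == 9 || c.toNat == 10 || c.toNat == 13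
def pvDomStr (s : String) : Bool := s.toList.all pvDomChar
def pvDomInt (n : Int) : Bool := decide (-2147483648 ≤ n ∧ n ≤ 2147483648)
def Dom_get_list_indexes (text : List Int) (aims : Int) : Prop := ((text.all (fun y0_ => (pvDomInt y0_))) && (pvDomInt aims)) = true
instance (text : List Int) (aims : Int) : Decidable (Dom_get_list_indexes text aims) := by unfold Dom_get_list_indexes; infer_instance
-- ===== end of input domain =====

-- B replaces A's element-by-element enumeration with a cursor loop that repeatedly
-- calls list.index(aims, start) to jump from match to match (alternative, same cost).

-- ===== PORT A =====
-- for i in text: if i == aims: info.append(a); a += 1  — fold carrying (info, a)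
def get_list_indexes (text : List Int) (aims : Int) : List Int :=
  (text.foldl (fun (st : List Int × Int) i =>
    (if i == aims then st.1 ++ [st.2] else st.1, st.2 + 1)) ([], 0)).1

-- ===== PORT B =====
-- text.index(aims, start): first index ≥ start holding aims (none = ValueError)
def altIndexFrom (text : List Int) (aims : Int) (start : Nat) : Option Nat :=
  ((text.drop start).findIdx? (· == aims)).map (· + start)

-- while True: idx = text.index(aims, start) / except ValueError: break / append; start = idx+1
def altLoop (text : List Int) (aims : Int) (start : Nat) : List Int :=
  match h : altIndexFrom text aims start with
  | none => []
  | some idx => (idx : Int) :: altLoop text aims (idx + 1)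
termination_by text.length - start
decreasing_by
  simp only [altIndexFrom, Option.map_eq_some_iff] at h
  obtain ⟨j, hj, rfl⟩ := h
  have := List.findIdx?_eq_some_iff_findIdx_eq.mp hj |>.1
  simp [List.length_drop] at this
  omega

def get_list_indexes_alt (text : List Int) (aims : Int) : List Int :=
  altLoop text aims 0

-- ===== PRECONDITION & SPEC =====
def Spec_get_list_indexes (text : List Int) (aims : Int) (out : List Int) : Prop := out = get_list_indexes_alt text aims
instance (text : List Int) (aims : Int) (out : List Int) : Decidable (Spec_get_list_indexes text aims out) := by unfold Spec_get_list_indexes; infer_instance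

-- ===== CLAIM (what is proved, stated in full; the proofs are below) =====
def Claim_equal_get_list_indexes : Prop := ∀ (text : List Int) (aims : Int), Dom_get_list_indexes text aims → Spec_get_list_indexes text aims (get_list_indexes text aims)

-- ===== LEMMAS AND PROOFS =====

-- reference enumeration shared by both directions of the proof
def refGo (aims : Int) : List Int → Int → List Int
  | [], _ => []
  | x :: xs, pos => if x == aims then pos :: refGo aims xs (pos + 1) else refGo aims xs (pos + 1)

theorem foldA_eq (aims : Int) (xs : List Int) : ∀ (acc : List Int) (a : Int),
    (xs.foldl (fun (st : List Int × Int) i =>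
      (if i == aims then st.1 ++ [st.2] else st.1, st.2 + 1)) (acc, a)).1
      = acc ++ refGo aims xs a := by
  induction xs with
  | nil => intro acc a; simp [refGo]
  | cons x xs ih =>
    intro acc a
    by_cases h : x == aims
    · simp only [List.foldl_cons, h, if_true, refGo]
      rw [ih]; simp
    · simp only [List.foldl_cons, h, Bool.false_eq_true, if_false, refGo]
      rw [ih]

theorem altLoop_none (text : List Int) (aims : Int) (s : Nat)
    (h : altIndexFrom text aims s = none) : altLoop text aims s = [] := by
  rw [altLoop]
  split
  · rfl
  · next idx heq => rw [h] at heq; cases heq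

theorem altLoop_some (text : List Int) (aims : Int) (s idx : Nat)
    (h : altIndexFrom text aims s = some idx) :
    altLoop text aims s = (idx : Int) :: altLoop text aims (idx + 1) := by
  rw [altLoop]
  split
  · next heq => rw [h] at heq; cases heq
  · next idx' heq => rw [h] at heq; cases heq; rfl

theorem altLoop_eq (text : List Int) (aims : Int) : ∀ (n start : Nat),
    text.length - start ≤ n → altLoop text aims start = refGo aims (text.drop start) (start : Int) := by
  intro n
  induction n with
  | zero =>
    intro start hle
    have hrest : text.drop start = [] := by
      apply List.drop_eq_nil_of_le; omega
    rw [altLoop_none text aims start (by simp [altIndexFrom, hrest])]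
    simp [hrest, refGo]
  | succ n ih =>
    intro start hle
    cases hrest : text.drop start with
    | nil =>
      rw [altLoop_none text aims start (by simp [altIndexFrom, hrest])]
      simp [refGo]
    | cons x xs =>
      have hlen : start < text.length := by
        have h1 : (text.drop start).length = text.length - start := List.length_drop ..
        rw [hrest] at h1; simp at h1; omega
      have hdrop : text.drop (start + 1) = xs := by
        rw [← List.drop_drop, hrest]; rfl
      by_cases hx : x == aims
      · have hidx : altIndexFrom text aims start = some start := by
          simp [altIndexFrom, hrest, List.findIdx?_cons, hx]
        rw [altLoop_some text aims start start hidx, ih (start + 1) (by omega), hdrop]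
        simp only [refGo, hx, if_true]
        norm_cast
      · have hstep : altIndexFrom text aims start = altIndexFrom text aims (start + 1) := by
          simp [altIndexFrom, hrest, List.findIdx?_cons, hx, hdrop, Option.map_map]
          simp [Nat.add_comm]
        have hsame : altLoop text aims start = altLoop text aims (start + 1) := by
          cases hidx : altIndexFrom text aims (start + 1) with
          | none => rw [altLoop_none text aims start (hstep.trans hidx), altLoop_none text aims (start+1) hidx]
          | some idx => rw [altLoop_some text aims start idx (hstep.trans hidx), altLoop_some text aims (start+1) idx hidx]
        rw [hsame, ih (start + 1) (by omega), hdrop]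
        simp only [refGo, hx, Bool.false_eq_true, if_false]
        norm_cast

theorem get_list_indexes_spec : Claim_equal_get_list_indexes := by
  intro text aims _
  unfold Spec_get_list_indexes get_list_indexes get_list_indexes_alt
  rw [foldA_eq, altLoop_eq text aims text.length 0 (by omega)]
  simp
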